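-- pv_equiv track=rewrite | github.com/shengwenyuan/DHIRL | data/labyrinth/preprocess/preprocess.py | compute_trial_time
-- ===== SOURCE A (Python) =====
-- def compute_trial_time(trial):
--     """Compute total time accounting for wrap-arounds"""
--     total_time = 0
--     first_time = trial[0]
--     for i in range(1, len(trial)):
--         if trial[i] < trial[i - 1]:  # Wrap-around detected
--             total_time += trial[i - 1] - first_time
--             first_time = trial[i]
--     total_time += trial[-1] - first_time
--     return total_time
-- ===== SOURCE B (Python) =====
-- def compute_trial_time(trial):
--     """Compute total time accounting for wrap-arounds"""
--     prev = trial[0]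
--     total = 0
--     for t in trial[1:]:
--         if t >= prev:
--             total += t - prev
--         prev = t
--     return total
-- ===== Notes on version B (the rewrite author's own statement) =====
-- stated objective: simpler
-- what changed: Replaces segment-anchor bookkeeping (first_time plus lump-sum on wrap and a final add of trial[-1]-first_time) with a single running accumulation of the non-negative consecutive increments t-prev; no index arithmetic and no post-loop correction.
import Mathlib
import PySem

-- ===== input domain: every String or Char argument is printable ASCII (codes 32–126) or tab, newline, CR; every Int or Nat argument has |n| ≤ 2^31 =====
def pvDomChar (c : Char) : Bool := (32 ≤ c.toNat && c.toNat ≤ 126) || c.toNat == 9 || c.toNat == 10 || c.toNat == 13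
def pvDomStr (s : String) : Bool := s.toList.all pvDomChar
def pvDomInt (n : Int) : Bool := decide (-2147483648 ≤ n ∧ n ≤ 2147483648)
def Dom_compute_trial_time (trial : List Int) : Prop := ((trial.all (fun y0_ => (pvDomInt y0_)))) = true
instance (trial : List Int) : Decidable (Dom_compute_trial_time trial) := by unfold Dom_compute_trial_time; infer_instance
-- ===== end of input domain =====

-- B replaces A's segment-anchor (first_time) bookkeeping with a running sum of the
-- non-negative consecutive increments; objective: simpler. Equivalence on return value.

-- ===== PORT A =====
def compute_trial_time (trial : List Int) : Int :=
  let st := (PySem.List.pyRange 1 (trial.length : Int) 1).foldl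
    (fun (s : Int × Int) i =>
      if PySem.List.pyGetD trial i 0 < PySem.List.pyGetD trial (i - 1) 0 then
        (s.1 + (PySem.List.pyGetD trial (i - 1) 0 - s.2), PySem.List.pyGetD trial i 0)
      else s)
    (0, PySem.List.pyGetD trial 0 0)
  st.1 + (PySem.List.pyGetD trial (-1) 0 - st.2)

-- ===== PORT B =====
def compute_trial_time_alt (trial : List Int) : Int :=
  let prev : Int := PySem.List.pyGetD trial 0 0
  let st := (PySem.List.slice trial (some 1) none).foldl
    (fun (s : Int × Int) t => (if s.2 ≤ t then s.1 + (t - s.2) else s.1, t))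
    (0, prev)
  st.1

-- ===== PRECONDITION & SPEC =====
-- Python A raises IndexError on the empty list (trial[0]); B does too, so the empty list is excluded.
def Pre_compute_trial_time (trial : List Int) : Prop := trial ≠ []
instance (trial : List Int) : Decidable (Pre_compute_trial_time trial) := by unfold Pre_compute_trial_time; infer_instance
def pvWitness_compute_trial_time : List Int := [3, 5, 1, 4]

def Spec_compute_trial_time (trial : List Int) (out : Int) : Prop := out = compute_trial_time_alt trial
instance (trial : List Int) (out : Int) : Decidable (Spec_compute_trial_time trial out) := by unfold Spec_compute_trial_time; infer_instance

-- ===== CLAIM (what is proved, stated in full; the proofs are below) =====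
def Claim_equal_compute_trial_time : Prop := ∀ (trial : List Int), Dom_compute_trial_time trial → Pre_compute_trial_time trial → Spec_compute_trial_time trial (compute_trial_time trial)

-- ===== LEMMAS AND PROOFS =====

-- A's step (on list l) and B's step, named for the proofs.
def pvStepA (l : List Int) (s : Int × Int) (i : Int) : Int × Int :=
  if PySem.List.pyGetD l i 0 < PySem.List.pyGetD l (i - 1) 0 then
    (s.1 + (PySem.List.pyGetD l (i - 1) 0 - s.2), PySem.List.pyGetD l i 0)
  else s

def pvStepB (s : Int × Int) (t : Int) : Int × Int :=
  (if s.2 ≤ t then s.1 + (t - s.2) else s.1, t)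

-- Key invariant: A's remaining fold from index i+1, with its final correction
-- st.1 + (l[-1] - st.2), equals B's fold over the remaining suffix seeded with
-- total already incremented by (l[i] - fst) and prev = l[i].
theorem pvKey (l : List Int) : ∀ (n i : Nat) (acc : Int × Int),
    l.length - (i + 1) = n → i < l.length →
    (let st := (PySem.List.pyRange ((i : Int) + 1) (l.length : Int) 1).foldl (pvStepA l) acc
     st.1 + (PySem.List.pyGetD l (-1) 0 - st.2))
    = ((l.drop (i + 1)).foldl pvStepB (acc.1 + (l.getD i 0 - acc.2), l.getD i 0)).1 := by
  intro n
  induction n with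
  | zero =>
    intro i acc hn hi
    have hlen : l.length = i + 1 := by omega
    have hnil : PySem.List.pyRange ((i : Int) + 1) (l.length : Int) 1 = [] := by
      apply PySem.List.pyRange_one_eq_nil; omega
    have hne : l ≠ [] := by intro h; simp [h] at hi
    have hlast : PySem.List.pyGetD l (-1) 0 = l.getLast hne := PySem.List.pyGetD_neg_one l 0 hne
    have hgetD : l.getD i 0 = l.getLast hne := by
      have hidx : l.length - 1 = i := by omega
      rw [List.getLast_eq_getElem]
      simp only [hidx]
      rw [List.getD_eq_getElem l 0 (by omega)]
    rw [hnil]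
    simp only [List.foldl_nil]
    rw [List.drop_eq_nil_of_le (by omega : l.length ≤ i + 1)]
    simp only [List.foldl_nil]
    rw [hlast, hgetD]
  | succ n ih =>
    intro i acc hn hi
    have hi1 : i + 1 < l.length := by omega
    have hcons : PySem.List.pyRange ((i : Int) + 1) (l.length : Int) 1
        = ((i : Int) + 1) :: PySem.List.pyRange (((i : Int) + 1) + 1) (l.length : Int) 1 := by
      apply PySem.List.pyRange_one_cons; omega
    have hdrop : l.drop (i + 1) = l[i + 1] :: l.drop (i + 2) := by
      rw [List.drop_eq_getElem_cons hi1]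
    have hgi : PySem.List.pyGetD l ((i : Int) + 1) 0 = l.getD (i + 1) 0 := by
      have : ((i : Int) + 1) = ((i + 1 : Nat) : Int) := by push_cast; ring
      rw [this, PySem.List.pyGetD_natCast]
    have hgd1 : l.getD (i + 1) 0 = l[i + 1] := by
      simp [List.getD, List.getElem?_eq_getElem hi1]
    have hih := fun acc' => ih (i + 1) acc' (by omega) hi1
    rw [hcons]
    simp only [List.foldl_cons]
    have hshift : (((i + 1 : Nat) : Int) + 1) = (((i : Int) + 1) + 1) := by push_cast; ring
    rw [show pvStepA l acc ((i : Int) + 1)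
        = (if l.getD (i + 1) 0 < l.getD i 0 then
            (acc.1 + (l.getD i 0 - acc.2), l.getD (i + 1) 0) else acc) by
      simp [pvStepA, hgi]]
    by_cases hc : l.getD (i + 1) 0 < l.getD i 0
    · rw [if_pos hc]
      have := hih (acc.1 + (l.getD i 0 - acc.2), l.getD (i + 1) 0)
      rw [hshift] at this
      rw [this]
      rw [hdrop]
      simp only [List.foldl_cons]
      have hlt : l[i + 1] < l.getD i 0 := by rw [← hgd1]; exact hc
      have hstep : pvStepB (acc.1 + (l.getD i 0 - acc.2), l.getD i 0) l[i + 1]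
          = (acc.1 + (l.getD i 0 - acc.2), l[i + 1]) := by
        show (if l.getD i 0 ≤ l[i + 1] then _ else _, _) = _
        rw [if_neg (not_le.mpr hlt)]
      rw [hstep, hgd1]
      ring_nf
    · rw [if_neg hc]
      have := hih acc
      rw [hshift] at this
      rw [this]
      rw [hdrop]
      simp only [List.foldl_cons]
      have hge : l.getD i 0 ≤ l[i + 1] := by rw [← hgd1]; omega
      have hstep : pvStepB (acc.1 + (l.getD i 0 - acc.2), l.getD i 0) l[i + 1]
          = (acc.1 + (l.getD i 0 - acc.2) + (l[i + 1] - l.getD i 0), l[i + 1]) := by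
        show (if l.getD i 0 ≤ l[i + 1] then _ else _, _) = _
        rw [if_pos hge]
      rw [hstep, hgd1]
      ring_nf

-- ===== VERDICT (by name: the statement is the Claim_ definition above) =====
theorem compute_trial_time_spec : Claim_equal_compute_trial_time := by
  intro trial _ hpre
  unfold Spec_compute_trial_time compute_trial_time compute_trial_time_alt
  obtain ⟨x, xs, rfl⟩ : ∃ x xs, trial = x :: xs := by
    cases trial with
    | nil => exact absurd rfl hpre
    | cons x xs => exact ⟨x, xs, rfl⟩
  have h0 : (0 : Nat) < (x :: xs).length := by simp
  have hkey := pvKey (x :: xs) ((x :: xs).length - 1) 0 (0, PySem.List.pyGetD (x :: xs) 0 0)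
    (by omega) h0
  simp only [Int.natCast_zero, zero_add] at hkey
  have hA : (fun (s : Int × Int) i =>
      if PySem.List.pyGetD (x :: xs) i 0 < PySem.List.pyGetD (x :: xs) (i - 1) 0 then
        (s.1 + (PySem.List.pyGetD (x :: xs) (i - 1) 0 - s.2), PySem.List.pyGetD (x :: xs) i 0)
      else s) = pvStepA (x :: xs) := by
    funext s i; simp [pvStepA]
  have hB : (fun (s : Int × Int) (t : Int) => (if s.2 ≤ t then s.1 + (t - s.2) else s.1, t))
      = pvStepB := by funext s t; simp [pvStepB]
  simp only [hA, hB]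
  rw [hkey]
  rw [PySem.List.slice_from_one]
  simp [PySem.List.pyGetD_zero_cons, List.getD]
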